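-- pv_equiv track=rewrite | github.com/bbugyi200/dotfiles | home/lib/gai/hitl_review_workflow.py | _parse_project_spec
-- ===== SOURCE A (Python) =====
-- def _parse_project_spec(content: str) -> tuple[str | None, list[dict[str, str]]]:
--     """
--     Parse a ProjectSpec file into a BUG ID and a list of ChangeSpec dictionaries.
--
--     This is a copy of the function from work_projects_workflow.workflow_nodes
--     to avoid circular imports.
--
--     Returns:
--         Tuple of (bug_id, changespecs)
--     """
--     lines = content.split("\n")
--     bug_id = None
--     changespecs = []
--     current_cs: dict[str, str] = {}
--     current_field = None
--     current_value_lines: list[str] = []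
--
--     # Check if first line is BUG field (handle both "BUG:" and "BUG " formats)
--     if lines and (lines[0].startswith("BUG:") or lines[0].startswith("BUG ")):
--         if lines[0].startswith("BUG:"):
--             bug_id = lines[0][4:].strip()  # Extract bug ID (everything after "BUG:")
--         else:
--             bug_id = lines[0][4:].strip()  # Extract bug ID (everything after "BUG ")
--         lines = lines[1:]  # Remove the BUG line
--
--     for line in lines:
--         # Check if this is a field header
--         if line and not line.startswith(" ") and ":" in line:
--             # Save previous field if exists
--             if current_field:
--                 current_cs[current_field] = "\n".join(current_value_lines).strip()
--                 current_value_lines = []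
--
--             # Parse new field
--             field, value = line.split(":", 1)
--             current_field = field.strip()
--             value = value.strip()
--
--             if value:  # Single-line field value
--                 current_cs[current_field] = value
--                 current_field = None
--             # else: multi-line field, continue collecting lines
--
--         elif line.startswith("  ") and current_field:
--             # Continuation of multi-line field (2-space indented)
--             current_value_lines.append(line[2:])  # Remove 2-space indent
--
--         elif not line.strip():
--             # Blank line
--             if current_field:
--                 # Blank line inside a multi-line field - preserve it
--                 current_value_lines.append("")
--             else:
--                 # Blank line between ChangeSpecs - end current ChangeSpec
--                 if current_cs:
--                     changespecs.append(current_cs)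
--                     current_cs = {}
--
--     # Don't forget the last ChangeSpec if file doesn't end with blank line
--     if current_field:
--         current_cs[current_field] = "\n".join(current_value_lines).strip()
--     if current_cs:
--         changespecs.append(current_cs)
--
--     return bug_id, changespecs
-- ===== SOURCE B (Python) =====
-- def _parse_project_spec(content: str) -> tuple:
--     """Two-pass variant: tokenize each line by shape, then consume the tokens."""
--     lines = content.split("\n")
--     bug_id = None
--     if lines[0].startswith(("BUG:", "BUG ")):
--         bug_id = lines[0][4:].strip()
--         lines = lines[1:]
--
--     # Pass 1: map each line to a typed token, purely by its shape.
--     tokens = []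
--     for line in lines:
--         if line and not line.startswith(" ") and ":" in line:
--             f, v = line.split(":", 1)
--             tokens.append(("H", f.strip(), v.strip()))
--         elif line.startswith("  "):
--             tokens.append(("C", line[2:], line.strip() == ""))
--         elif not line.strip():
--             tokens.append(("B",))
--         else:
--             tokens.append(("I",))
--
--     # Pass 2: run the state machine over the tokens.
--     specs = []
--     cs = {}
--     cf = ""  # empty string means: no multi-line field open
--     vl = []
--     for t in tokens:
--         if t[0] == "H":
--             _, f, v = t
--             if cf:
--                 cs[cf] = "\n".join(vl).strip()
--                 vl = []
--             if v:
--                 cs[f] = v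
--                 cf = ""
--             else:
--                 cf = f
--         elif t[0] == "C":
--             _, text, is_blank = t
--             if cf:
--                 vl.append(text)
--             elif is_blank:
--                 if cs:
--                     specs.append(cs)
--                     cs = {}
--         elif t[0] == "B":
--             if cf:
--                 vl.append("")
--             elif cs:
--                 specs.append(cs)
--                 cs = {}
--     if cf:
--         cs[cf] = "\n".join(vl).strip()
--     if cs:
--         specs.append(cs)
--     return bug_id, specs
-- ===== Notes on version B (the rewrite author's own statement) =====
-- stated objective: alternative
-- what changed: A's single line loop that interleaves classification with mutation is split into two passes: a pure shape-only tokenizer (header/continuation/blank/ignore per line) followed by a token-consuming state machine that uses an empty-string sentinel instead of None for the open field.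
import Mathlib
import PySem

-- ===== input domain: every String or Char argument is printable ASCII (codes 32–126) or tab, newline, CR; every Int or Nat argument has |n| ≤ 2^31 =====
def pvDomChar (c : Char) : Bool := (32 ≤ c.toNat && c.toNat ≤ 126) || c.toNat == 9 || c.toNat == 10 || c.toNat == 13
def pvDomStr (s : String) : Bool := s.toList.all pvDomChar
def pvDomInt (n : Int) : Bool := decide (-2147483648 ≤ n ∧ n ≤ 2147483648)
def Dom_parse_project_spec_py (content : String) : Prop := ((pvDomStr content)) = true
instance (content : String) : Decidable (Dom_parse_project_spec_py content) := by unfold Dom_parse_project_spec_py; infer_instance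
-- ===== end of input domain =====

-- B re-decomposes A's single stateful line loop into two passes: a shape-only tokenizer
-- (header/continuation/blank/ignore) followed by a token-consuming state machine ("alternative").


-- ===== PORT A =====

-- Python truthiness of `current_field : Optional[str]` (None and "" are both falsy).
def pvTruthyOpt (o : Option String) : Bool :=
  match o with
  | none => false
  | some s => !(s == "")

-- loop state: (changespecs, current_cs, current_field, current_value_lines)
abbrev PvAState := List (PySem.Dict String String) × PySem.Dict String String × Option String × List String

-- one iteration of A's `for line in lines` loop; `cf.getD ""` under the truthy guard is
-- exactly the string inside `cf` (truthy excludes none).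
def pvStepA : PvAState → String → PvAState
  | (specs, cs, cf, vl), line =>
    if !(line == "") && !(PySem.Str.startswith line " ") && PySem.Str.isIn ":" line then
      let (cs, vl) :=
        if pvTruthyOpt cf then
          (cs.insert (cf.getD "") (PySem.Str.strip (PySem.Str.join "\n" vl)), ([] : List String))
        else (cs, vl)
      -- field, value = line.split(":", 1)  (":" in line guarantees two parts)
      let parts := (PySem.Str.splitMax? line ":" 1).getD []
      let field := PySem.Str.strip (PySem.List.pyGetD parts 0 "")
      let value := PySem.Str.strip (PySem.List.pyGetD parts 1 "")
      if !(value == "") then (specs, cs.insert field value, none, vl)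
      else (specs, cs, some field, vl)
    else if PySem.Str.startswith line "  " && pvTruthyOpt cf then
      (specs, cs, cf, vl ++ [PySem.Str.slice line (some 2) none])
    else if PySem.Str.strip line == "" then
      if pvTruthyOpt cf then (specs, cs, cf, vl ++ [""])
      else if cs.items.isEmpty then (specs, cs, cf, vl)
      else (specs ++ [cs], PySem.Dict.empty, cf, vl)
    else (specs, cs, cf, vl)

def parse_project_spec_py (content : String) : Option String × (List (List (String × String))) :=
  let lines := (PySem.Str.split? content "\n").getD []
  let (bug_id, lines) :=
    match lines with
    | l0 :: rest =>
      if PySem.Str.startswith l0 "BUG:" || PySem.Str.startswith l0 "BUG " then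
        -- A's inner if has identical branches; kept as in the source
        (if PySem.Str.startswith l0 "BUG:" then
           (some (PySem.Str.strip (PySem.Str.slice l0 (some 4) none)), rest)
         else
           (some (PySem.Str.strip (PySem.Str.slice l0 (some 4) none)), rest))
      else (none, l0 :: rest)
    | [] => (none, [])
  match lines.foldl pvStepA ([], PySem.Dict.empty, none, []) with
  | (specs, cs, cf, vl) =>
    let cs := if pvTruthyOpt cf then cs.insert (cf.getD "") (PySem.Str.strip (PySem.Str.join "\n" vl)) else cs
    let specs := if cs.items.isEmpty then specs else specs ++ [cs]
    (bug_id, specs.map (fun d : PySem.Dict String String => d.items))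

-- ===== PORT B =====

-- the typed tokens of Source B's first pass
inductive PvTok where
  | header : String → String → PvTok
  | cont : String → Bool → PvTok
  | blank : PvTok
  | ignore : PvTok
deriving DecidableEq, Repr

-- pass 1: classify one line purely by its shape
def pvTokB (line : String) : PvTok :=
  if !(line == "") && !(PySem.Str.startswith line " ") && PySem.Str.isIn ":" line then
    let parts := (PySem.Str.splitMax? line ":" 1).getD []
    .header (PySem.Str.strip (PySem.List.pyGetD parts 0 ""))
            (PySem.Str.strip (PySem.List.pyGetD parts 1 ""))
  else if PySem.Str.startswith line "  " then
    .cont (PySem.Str.slice line (some 2) none) (PySem.Str.strip line == "")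
  else if PySem.Str.strip line == "" then .blank
  else .ignore

-- B's state: current_field is a plain String; the empty string means no multi-line field open
abbrev PvBState := List (PySem.Dict String String) × PySem.Dict String String × String × List String

-- pass 2: one token of Source B's state machine
def pvConsumeB : PvBState → PvTok → PvBState
  | (specs, cs, cf, vl), t =>
    match t with
    | .header f v =>
      let (cs, vl) :=
        if !(cf == "") then
          (cs.insert cf (PySem.Str.strip (PySem.Str.join "\n" vl)), ([] : List String))
        else (cs, vl)
      if !(v == "") then (specs, cs.insert f v, "", vl) else (specs, cs, f, vl)
    | .cont text isBlank =>
      if !(cf == "") then (specs, cs, cf, vl ++ [text])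
      else if isBlank then
        if cs.items.isEmpty then (specs, cs, cf, vl)
        else (specs ++ [cs], PySem.Dict.empty, cf, vl)
      else (specs, cs, cf, vl)
    | .blank =>
      if !(cf == "") then (specs, cs, cf, vl ++ [""])
      else if cs.items.isEmpty then (specs, cs, cf, vl)
      else (specs ++ [cs], PySem.Dict.empty, cf, vl)
    | .ignore => (specs, cs, cf, vl)

def parse_project_spec_py_alt (content : String) : Option String × (List (List (String × String))) :=
  let lines := (PySem.Str.split? content "\n").getD []
  let (bug_id, lines) :=
    match lines with
    | l0 :: rest =>
      if PySem.Str.startswith l0 "BUG:" || PySem.Str.startswith l0 "BUG " then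
        (some (PySem.Str.strip (PySem.Str.slice l0 (some 4) none)), rest)
      else (none, l0 :: rest)
    | [] => (none, [])
  let toks := lines.map pvTokB
  match toks.foldl pvConsumeB ([], PySem.Dict.empty, "", []) with
  | (specs, cs, cf, vl) =>
    let cs := if !(cf == "") then cs.insert cf (PySem.Str.strip (PySem.Str.join "\n" vl)) else cs
    let specs := if cs.items.isEmpty then specs else specs ++ [cs]
    (bug_id, specs.map (fun d : PySem.Dict String String => d.items))

-- ===== PRECONDITION & SPEC =====
def Spec_parse_project_spec_py (content : String) (out : Option String × (List (List (String × String)))) : Prop := out = parse_project_spec_py_alt content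
instance (content : String) (out : Option String × (List (List (String × String)))) : Decidable (Spec_parse_project_spec_py content out) := by unfold Spec_parse_project_spec_py; infer_instance

-- ===== CLAIM (what is proved, stated in full; the proofs are below) =====
def Claim_equal_parse_project_spec_py : Prop := ∀ (content : String), Dom_parse_project_spec_py content → Spec_parse_project_spec_py content (parse_project_spec_py content)

-- ===== LEMMAS AND PROOFS =====

-- simulation relation: states agree componentwise; A's Option field corresponds to B's ""-sentinel
def pvRel (a : PvAState) (b : PvBState) : Prop :=
  a.1 = b.1 ∧ a.2.1 = b.2.1 ∧ a.2.2.1.getD "" = b.2.2.1 ∧ a.2.2.2 = b.2.2.2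

theorem pvTruthy_eq (o : Option String) : pvTruthyOpt o = !(o.getD "" == "") := by
  cases o <;> simp [pvTruthyOpt]

theorem pvStep_sim (a : PvAState) (b : PvBState) (line : String) (h : pvRel a b) :
    pvRel (pvStepA a line) (pvConsumeB b (pvTokB line)) := by
  obtain ⟨specsA, csA, cfA, vlA⟩ := a
  obtain ⟨specsB, csB, cfB, vlB⟩ := b
  obtain ⟨h1, h2, h3, h4⟩ := h
  simp only at h1 h2 h3 h4
  subst h1 h2 h3 h4
  simp only [pvStepA, pvConsumeB, pvTokB, pvTruthy_eq]
  split_ifs <;> simp_all [pvRel]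

theorem pvFold_sim (lines : List String) (a : PvAState) (b : PvBState) (h : pvRel a b) :
    pvRel (lines.foldl pvStepA a) ((lines.map pvTokB).foldl pvConsumeB b) := by
  induction lines generalizing a b with
  | nil => exact h
  | cons l rest ih => exact ih _ _ (pvStep_sim a b l h)

theorem pvRun_eq (lines : List String) :
    (match lines.foldl pvStepA ([], PySem.Dict.empty, none, []) with
     | (specs, cs, cf, vl) =>
       let cs := if pvTruthyOpt cf then cs.insert (cf.getD "") (PySem.Str.strip (PySem.Str.join "\n" vl)) else cs
       let specs := if cs.items.isEmpty then specs else specs ++ [cs]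
       specs.map (fun d : PySem.Dict String String => d.items))
    = (match (lines.map pvTokB).foldl pvConsumeB ([], PySem.Dict.empty, "", []) with
       | (specs, cs, cf, vl) =>
         let cs := if !(cf == "") then cs.insert cf (PySem.Str.strip (PySem.Str.join "\n" vl)) else cs
         let specs := if cs.items.isEmpty then specs else specs ++ [cs]
         specs.map (fun d : PySem.Dict String String => d.items)) := by
  have h := pvFold_sim lines ([], PySem.Dict.empty, none, []) ([], PySem.Dict.empty, "", []) ⟨rfl, rfl, rfl, rfl⟩
  generalize lines.foldl pvStepA ([], PySem.Dict.empty, none, []) = stA at h ⊢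
  generalize (lines.map pvTokB).foldl pvConsumeB ([], PySem.Dict.empty, "", []) = stB at h ⊢
  obtain ⟨specsA, csA, cfA, vlA⟩ := stA
  obtain ⟨specsB, csB, cfB, vlB⟩ := stB
  obtain ⟨h1, h2, h3, h4⟩ := h
  simp only at h1 h2 h3 h4
  subst h1 h2 h3 h4
  simp only [pvTruthy_eq]

-- ===== VERDICT (by name: the statement is the Claim_ definition above) =====
theorem parse_project_spec_py_spec : Claim_equal_parse_project_spec_py := by
  intro content _
  unfold Spec_parse_project_spec_py parse_project_spec_py parse_project_spec_py_alt
  cases hl : (PySem.Str.split? content "\n").getD [] with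
  | nil => simpa using pvRun_eq []
  | cons l0 rest =>
    by_cases hb1 : PySem.Chars.startswith l0.toList ['B', 'U', 'G', ':'] = true <;>
      by_cases hb2 : PySem.Chars.startswith l0.toList ['B', 'U', 'G', ' '] = true
    · simpa [hb1, hb2] using pvRun_eq rest
    · simpa [hb1, hb2] using pvRun_eq rest
    · simpa [hb1, hb2] using pvRun_eq rest
    · simpa [hb1, hb2] using pvRun_eq (l0 :: rest)
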